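-- pv_equiv track=rewrite | github.com/Lab00700/Algorithm | 프로그래머스/0/120842. 2차원으로 만들기/2차원으로 만들기.py | solution
-- ===== SOURCE A (Python) =====
-- def solution(num_list, n):
--     answer = []
--     t=[]
--     for i in range(len(num_list)):
--         t.append(num_list[i])
--         if (i+1)%n==0:
--             answer.append(t)
--             t=[]
--     return answer
-- ===== SOURCE B (Python) =====
-- def solution(num_list, n):
--     answer = [num_list[i:i + n] for i in range(0, len(num_list) - len(num_list) % n, n)]
--     return answer
-- ===== Notes on version B (the rewrite author's own statement) =====
-- stated objective: simpler
-- what changed: B computes chunk start indices with a step-n range and slices each row out directly, instead of A's per-element loop with a running buffer flushed by a modulo test; slicing does the per-row copying in bulk.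
-- outside the precondition, e.g. on solution([1, 2], -1): A returns [[1], [2]], B returns []; on solution([], 0): A returns [], B raises ZeroDivisionError
import Mathlib
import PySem

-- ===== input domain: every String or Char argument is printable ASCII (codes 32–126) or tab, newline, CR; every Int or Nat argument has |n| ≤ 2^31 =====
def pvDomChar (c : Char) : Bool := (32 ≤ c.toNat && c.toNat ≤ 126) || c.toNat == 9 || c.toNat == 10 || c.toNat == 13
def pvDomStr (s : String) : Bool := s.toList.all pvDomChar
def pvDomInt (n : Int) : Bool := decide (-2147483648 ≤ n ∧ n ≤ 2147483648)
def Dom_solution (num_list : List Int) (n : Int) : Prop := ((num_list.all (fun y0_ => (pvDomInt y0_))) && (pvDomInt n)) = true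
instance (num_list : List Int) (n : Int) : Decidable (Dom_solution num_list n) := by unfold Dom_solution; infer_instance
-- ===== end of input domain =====

-- B replaces A's running buffer flushed by a per-element modulo test with a step-n
-- range of chunk start indices and direct slicing (objective: simpler).


-- ===== PORT A =====
-- pyGetD with default 0 is exact here: the loop index i always lies in range.
def solution (num_list : List Int) (n : Int) : List (List Int) :=
  ((PySem.List.pyRange 0 (PySem.List.len num_list) 1).foldl
    (fun (st : List (List Int) × List Int) i =>
      let t := st.2 ++ [PySem.List.pyGetD num_list i 0]
      if PySem.Int.mod (i + 1) n = 0 then (st.1 ++ [t], ([] : List Int)) else (st.1, t))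
    ([], [])).1

-- ===== PORT B =====
def solution_alt (num_list : List Int) (n : Int) : List (List Int) :=
  (PySem.List.pyRange 0 (PySem.List.len num_list - PySem.Int.mod (PySem.List.len num_list) n) n).map
    (fun i => PySem.List.slice num_list (some i) (some (i + n)))

-- ===== PRECONDITION & SPEC =====
-- Pre_ excludes n = 0, where A raises ZeroDivisionError on every nonempty list (it returns
-- [] on the empty list only because the loop body never runs, while B raises even there),
-- and negative n with -n ≤ len(num_list), where A's chunking by |n| is an accident of
-- Python's divisor-sign modulo and B's natural slicing returns [].
def Pre_solution (num_list : List Int) (n : Int) : Prop :=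
  1 ≤ n ∨ (n < 0 ∧ ((num_list.length : Int) < -n))
instance (num_list : List Int) (n : Int) : Decidable (Pre_solution num_list n) := by unfold Pre_solution; infer_instance
def pvWitness_solution : List Int × Int := ([1, 2, 3, 4, 5], 2)
def Spec_solution (num_list : List Int) (n : Int) (out : List (List Int)) : Prop := out = solution_alt num_list n
instance (num_list : List Int) (n : Int) (out : List (List Int)) : Decidable (Spec_solution num_list n out) := by unfold Spec_solution; infer_instance

-- ===== CLAIM (what is proved, stated in full; the proofs are below) =====
def Claim_equal_solution : Prop := ∀ (num_list : List Int) (n : Int), Dom_solution num_list n → Pre_solution num_list n → Spec_solution num_list n (solution num_list n)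

-- ===== LEMMAS AND PROOFS =====

-- loop body of A, seen over enumerated (index, value) pairs
def pvStep (n : Int) (st : List (List Int) × List Int) (p : Int × Int) : List (List Int) × List Int :=
  let t := st.2 ++ [p.2]
  if PySem.Int.mod (p.1 + 1) n = 0 then (st.1 ++ [t], ([] : List Int)) else (st.1, t)

-- common normal form: the list of full chunks of size m
def pvChunks (m : Nat) (xs : List Int) : List (List Int) :=
  (List.range (xs.length / m)).map (fun k => (xs.drop (k * m)).take m)

theorem pv_chunks_cons {m : Nat} (hm : 1 ≤ m) {xs : List Int} (hlen : m ≤ xs.length) :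
    pvChunks m xs = xs.take m :: pvChunks m (xs.drop m) := by
  unfold pvChunks
  have hq : xs.length / m = (xs.drop m).length / m + 1 := by
    rw [List.length_drop]
    rw [Nat.div_eq_sub_div (by omega) hlen]
  rw [hq, List.range_succ_eq_map, List.map_cons, List.map_map]
  congr 1
  · simp
  · apply List.map_congr_left
    intro k _
    simp only [Function.comp]
    rw [List.drop_drop]
    congr 2
    simp [Nat.succ_mul]
    omega

theorem pv_noflush {n : Int} (ys : List Int) (s : Int) (acc : List (List Int)) (t : List Int)
    (h : ∀ k : Nat, k < ys.length → PySem.Int.mod (s + k + 1) n ≠ 0) :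
    (PySem.List.enumerate ys s).foldl (pvStep n) (acc, t) = (acc, t ++ ys) := by
  induction ys generalizing s t with
  | nil => simp [PySem.List.enumerate_nil]
  | cons y ys ih =>
    rw [PySem.List.enumerate_cons]
    have h0 : PySem.Int.mod (s + 1) n ≠ 0 := by
      have := h 0 (by simp)
      simpa using this
    simp only [List.foldl_cons, pvStep, if_neg h0]
    rw [ih (s + 1) (t ++ [y]) (fun k hk => by
      have := h (k + 1) (by simpa using Nat.succ_lt_succ hk)
      push_cast at this ⊢
      convert this using 3
      ring)]
    simp

theorem pv_mod_small {n : Int} (hn : 0 < n) {s : Int} (hs : PySem.Int.mod s n = 0)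
    (k : Int) (hk0 : 0 < k) (hkn : k < n) : PySem.Int.mod (s + k) n ≠ 0 := by
  rw [PySem.Int.mod_eq_emod_of_pos hn] at hs ⊢
  obtain ⟨q, hq⟩ : n ∣ s := Int.dvd_of_emod_eq_zero hs
  subst hq
  rw [add_comm, Int.add_mul_emod_self_left, Int.emod_eq_of_lt (by omega) hkn]
  omega

theorem pv_mainA {n : Int} (hn : 0 < n) (xs : List Int) (s : Int) (acc : List (List Int))
    (hs0 : 0 ≤ s) (hsmod : PySem.Int.mod s n = 0) :
    ((PySem.List.enumerate xs s).foldl (pvStep n) (acc, [])).1 = acc ++ pvChunks n.toNat xs := by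
  have hmn : ((n.toNat : Int)) = n := Int.toNat_of_nonneg (by omega)
  have hm1 : 1 ≤ n.toNat := by omega
  by_cases hlen : xs.length < n.toNat
  · rw [pv_noflush xs s acc []
      (fun k hk => by
        have : PySem.Int.mod (s + (↑k + 1)) n ≠ 0 :=
          pv_mod_small hn hsmod (↑k + 1) (by omega) (by push_cast; omega)
        convert this using 2
        ring)]
    simp [pvChunks, Nat.div_eq_of_lt hlen]
  · push_neg at hlen
    set m := n.toNat with hm
    have hm1' : m - 1 < xs.length := by omega
    have htake : xs.take m = xs.take (m - 1) ++ [xs[m - 1]] := by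
      conv_lhs => rw [show m = (m - 1) + 1 by omega]
      rw [List.take_succ]
      simp [List.getElem?_eq_getElem hm1']
    have hxs : xs = xs.take (m - 1) ++ (xs[m - 1] :: xs.drop m) := by
      rw [← List.singleton_append, ← List.append_assoc, ← htake, List.take_append_drop]
    have hlt : (xs.take (m - 1)).length = m - 1 := by
      simp
      omega
    conv_lhs => rw [hxs]
    rw [PySem.List.enumerate_append, List.foldl_append]
    rw [pv_noflush (xs.take (m - 1)) s acc []
      (fun k hk => by
        rw [hlt] at hk
        have : PySem.Int.mod (s + (↑k + 1)) n ≠ 0 :=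
          pv_mod_small hn hsmod (↑k + 1) (by omega) (by push_cast; omega)
        convert this using 2
        ring)]
    rw [PySem.List.enumerate_cons, List.foldl_cons]
    have hidx : s + ↑(xs.take (m - 1)).length + 1 = s + n := by
      rw [hlt]
      push_cast
      omega
    have hflush : PySem.Int.mod (s + ↑(xs.take (m - 1)).length + 1) n = 0 := by
      rw [hidx, PySem.Int.mod_eq_emod_of_pos hn]
      rw [PySem.Int.mod_eq_emod_of_pos hn] at hsmod
      rw [show s + n = s + n * 1 by ring, Int.add_mul_emod_self_left]
      exact hsmod
    simp only [pvStep, List.nil_append, if_pos hflush]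
    rw [show xs.take (m - 1) ++ [xs[m - 1]] = xs.take m from htake.symm]
    have hnext : PySem.List.enumerate (xs.drop m) (s + ↑(xs.take (m - 1)).length + 1) =
        PySem.List.enumerate (xs.drop m) (s + n) := by rw [hidx]
    rw [hnext]
    rw [pv_mainA hn (xs.drop m) (s + n) (acc ++ [xs.take m]) (by omega)
      (by
        rw [PySem.Int.mod_eq_emod_of_pos hn] at hsmod ⊢
        rw [show s + n = s + n * 1 by ring, Int.add_mul_emod_self_left]
        exact hsmod)]
    rw [pv_chunks_cons hm1 hlen]
    simp [hm]
termination_by xs.length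
decreasing_by
  simp only [List.length_drop]
  omega

theorem pv_A_eq {n : Int} (hn : 0 < n) (xs : List Int) :
    solution xs n = pvChunks n.toNat xs := by
  unfold solution
  have henum := PySem.List.enumerate_eq_map_pyRange xs (0 : Int)
  have : (PySem.List.pyRange 0 (PySem.List.len xs) 1).foldl
      (fun (st : List (List Int) × List Int) i =>
        let t := st.2 ++ [PySem.List.pyGetD xs i 0]
        if PySem.Int.mod (i + 1) n = 0 then (st.1 ++ [t], ([] : List Int)) else (st.1, t))
      ([], []) = (PySem.List.enumerate xs 0).foldl (pvStep n) ([], []) := by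
    rw [henum, List.foldl_map]
    rfl
  rw [this, pv_mainA hn xs 0 [] le_rfl (by simp [PySem.Int.mod_eq_emod_of_pos hn])]
  simp

theorem pv_B_eq {n : Int} (hn : 0 < n) (xs : List Int) :
    solution_alt xs n = pvChunks n.toNat xs := by
  unfold solution_alt
  set m := n.toNat with hm
  have hmn : ((m : Int)) = n := Int.toNat_of_nonneg (by omega)
  set L := xs.length with hL
  have hlen : PySem.List.len xs = (L : Int) := by simp [PySem.List.len, hL]
  have hmod : PySem.Int.mod (L : Int) n = ((L % m : Nat) : Int) := by
    rw [← hmn]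
    exact PySem.Int.mod_natCast L m
  have hub : (L : Int) - ((L % m : Nat) : Int) = ((m * (L / m) : Nat) : Int) := by
    rw [← Nat.cast_sub (Nat.mod_le L m)]
    congr 1
    have := Nat.div_add_mod L m
    omega
  rw [hlen, hmod, hub, PySem.List.pyRange_of_pos 0 ((m * (L / m) : Nat) : Int) hn]
  have hq : (if (0 : Int) < ((m * (L / m) : Nat) : Int)
      then (((((m * (L / m) : Nat) : Int)) - 0 + n - 1) / n).toNat else 0) = L / m := by
    by_cases hpos : (0 : Int) < ((m * (L / m) : Nat) : Int)
    · rw [if_pos hpos]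
      have h1 : (((m * (L / m) : Nat) : Int)) - 0 + n - 1 = ((m * (L / m) + m - 1 : Nat) : Int) := by
        rw [← hmn, show m * (L / m) + m - 1 = m * (L / m) + m - 1 from rfl,
          Nat.cast_sub (by omega : 1 ≤ m * (L / m) + m), Nat.cast_add]
        omega
      rw [h1, ← hmn, ← Int.natCast_div, Int.toNat_natCast]
      rw [Nat.mul_comm m (L / m), Nat.add_sub_assoc (by omega), Nat.add_comm,
        Nat.add_mul_div_right _ _ (by omega : 0 < m)]
      have : (m - 1) / m = 0 := Nat.div_eq_of_lt (by omega)
      omega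
    · rw [if_neg hpos]
      have h0 : m * (L / m) = 0 := by omega
      rcases Nat.mul_eq_zero.mp h0 with h | h <;> omega
  rw [hq, List.map_map]
  unfold pvChunks
  apply List.map_congr_left
  intro k _
  simp only [Function.comp]
  have h1 : (0 : Int) + n * ↑k = ((k * m : Nat) : Int) := by
    push_cast
    rw [← hmn]
    push_cast
    ring
  have h2 : ((k * m : Nat) : Int) + n = ((k * m : Nat) : Int) + ((m : Nat) : Int) := by
    rw [hmn]
  rw [h1, h2, PySem.List.slice_natCast_add]

theorem pv_A_neg {n : Int} (hn : n < 0) (xs : List Int) (hL : (xs.length : Int) < -n) :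
    solution xs n = [] := by
  unfold solution
  have hnf : ∀ k : Nat, k < xs.length → PySem.Int.mod ((0 : Int) + k + 1) n ≠ 0 := by
    intro k hk hmod
    have hdvd : n ∣ ((0 : Int) + k + 1) := (PySem.Int.mod_eq_zero_iff_dvd _ _).mp hmod
    have hdvd' : -n ∣ ((0 : Int) + k + 1) := (neg_dvd).mpr hdvd
    have := Int.le_of_dvd (by push_cast; omega) hdvd'
    push_cast at this hL
    omega
  have heq : (PySem.List.pyRange 0 (PySem.List.len xs) 1).foldl
      (fun (st : List (List Int) × List Int) i =>
        let t := st.2 ++ [PySem.List.pyGetD xs i 0]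
        if PySem.Int.mod (i + 1) n = 0 then (st.1 ++ [t], ([] : List Int)) else (st.1, t))
      ([], []) = (PySem.List.enumerate xs 0).foldl (pvStep n) ([], []) := by
    rw [PySem.List.enumerate_eq_map_pyRange xs (0 : Int), List.foldl_map]
    rfl
  rw [heq, pv_noflush xs (0 : Int) [] [] (by simpa using hnf)]

theorem pv_B_neg {n : Int} (hn : n < 0) (xs : List Int) : solution_alt xs n = [] := by
  unfold solution_alt
  have hmodle : PySem.Int.mod (PySem.List.len xs) n ≤ 0 := by
    have h1 := PySem.Int.mod_neg_neg (-(PySem.List.len xs)) (-n)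
    simp only [neg_neg] at h1
    rw [h1, PySem.Int.mod_eq_emod_of_pos (by omega : (0:Int) < -n)]
    have := Int.emod_nonneg (-(PySem.List.len xs)) (by omega : -n ≠ 0)
    omega
  have hlen0 : (0 : Int) ≤ PySem.List.len xs := by
    simp [PySem.List.len]
  have h0 : ¬ ((0 : Int) < n) := by omega
  have hne : ¬ (n = 0) := by omega
  have h1 : ¬ (((xs.length : Int)) < PySem.Int.mod ((xs.length : Int)) n) := by
    simp only [PySem.List.len] at hmodle hlen0 ⊢
    omega
  simp [PySem.List.pyRange, hne, h0, h1]

-- ===== VERDICT (by name: the statement is the Claim_ definition above) =====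
theorem solution_spec : Claim_equal_solution := by
  intro xs n _ hpre
  unfold Spec_solution
  rcases hpre with hpos | ⟨hneg, hlen⟩
  · have hn : (0 : Int) < n := hpos
    rw [pv_A_eq hn, pv_B_eq hn]
  · rw [pv_A_neg hneg xs hlen, pv_B_neg hneg xs]
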